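-- pv_equiv track=rewrite | github.com/brendane/miscellaneous_bioinfo_scripts | extract_ref_region_from_show_aligns.py | process_aln_txt
-- ===== SOURCE A (Python) =====
-- def process_aln_txt(a):
--     ret = []
--     r_begin = None
--     r_end = None
--     q_begin = None
--     q_end = None
--     in_aln = False
--     r_seq = ""
--     q_seq = ""
--     for line in a:
--         line = line.strip()
--         if line.startswith('-- BEGIN alignment'):
--             in_aln = True
--             fields = line.split()
--             r_begin = int(fields[5])
--             r_end = int(fields[7])
--             q_begin = int(fields[10])
--             q_end = int(fields[12])
--         elif line.startswith('--   END alignment'):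
--             in_aln = False
--             ret.append(((r_begin, r_end, q_begin, q_end), r_seq, q_seq))
--             r_seq = ''
--             q_seq = ''
--         elif in_aln:
--             if line == '':
--                 continue
--             if '|' in line or '^' in line:
--                 continue
--             s = ''.join(line.split()[1:]).upper()
--             if len(r_seq) > len(q_seq):
--                 q_seq += s
--             else:
--                 r_seq += s
--         else:
--             continue
--     return ret
-- ===== SOURCE B (Python) =====
-- def process_aln_txt(a):
--     # Pass 1: segment the lines into alignment blocks (header coords + kept data lines).
--     blocks = []
--     header = (None, None, None, None)
--     body = None
--     for raw in a:
--         line = raw.strip()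
--         if line.startswith('-- BEGIN alignment'):
--             fields = line.split()
--             header = (int(fields[5]), int(fields[7]), int(fields[10]), int(fields[12]))
--             if body is None:
--                 body = []
--         elif line.startswith('--   END alignment'):
--             blocks.append((header, body if body is not None else []))
--             body = None
--         elif body is not None and line and '|' not in line and '^' not in line:
--             body.append(line)
--     # Pass 2: rebuild the two sequences of each block with the length-balancing rule.
--     out = []
--     for header, body in blocks:
--         r_seq, q_seq = '', ''
--         for line in body:
--             s = ''.join(line.split()[1:]).upper()
--             if len(r_seq) > len(q_seq):
--                 q_seq += s
--             else:
--                 r_seq += s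
--         out.append((header, r_seq, q_seq))
--     return out
-- ===== Notes on version B (the rewrite author's own statement) =====
-- stated objective: alternative
-- what changed: B replaces A's single stateful scan (seven mutable variables interleaving parsing and sequence building) with a two-pass decomposition: first segment the lines into blocks (header coords + kept data lines), then rebuild each block's two sequences independently.
import Mathlib
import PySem

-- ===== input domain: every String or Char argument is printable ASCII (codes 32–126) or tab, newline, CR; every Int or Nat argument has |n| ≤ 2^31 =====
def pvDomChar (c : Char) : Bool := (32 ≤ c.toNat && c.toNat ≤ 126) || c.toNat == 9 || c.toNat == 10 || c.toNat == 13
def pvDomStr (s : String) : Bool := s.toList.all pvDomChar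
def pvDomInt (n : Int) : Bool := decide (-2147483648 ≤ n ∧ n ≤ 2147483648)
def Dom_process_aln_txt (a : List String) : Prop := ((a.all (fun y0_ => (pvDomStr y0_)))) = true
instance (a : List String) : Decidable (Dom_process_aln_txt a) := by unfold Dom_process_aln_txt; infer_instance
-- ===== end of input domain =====

-- B replaces A's single stateful scan with a two-pass decomposition (segment into blocks, then rebuild
-- each block's sequences); same cost, proved to return the same records.

-- shared text helpers (both Pythons contain these identical expressions)
def pvBEGIN : List Char := "-- BEGIN alignment".toList
def pvEND : List Char := "--   END alignment".toList
-- int(fields[k]) for k = 5,7,10,12; Python raises on a missing field or bad int — Pre_ excludes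
-- those lines, so the `getD` defaults are never reached on admitted inputs.
def pvHeader (l : List Char) : Int × Int × Int × Int :=
  let fs := PySem.Chars.split₀ l
  ((PySem.Int.ofChars? (fs.getD 5 [])).getD 0,
   (PySem.Int.ofChars? (fs.getD 7 [])).getD 0,
   (PySem.Int.ofChars? (fs.getD 10 [])).getD 0,
   (PySem.Int.ofChars? (fs.getD 12 [])).getD 0)
-- ''.join(line.split()[1:]).upper()
def pvSeqWord (l : List Char) : List Char :=
  PySem.Chars.upper (((PySem.Chars.split₀ l).drop 1).flatten)

-- ===== PORT A =====
-- A's loop state: result list, the four coords (Python's None modelled as 0; Pre_ excludes END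
-- before any BEGIN, where Python's value is a tuple of None, outside the declared type), flag, two sequences.
structure PvStA where
  ret : List ((Int × Int × Int × Int) × String × String)
  hdr : Int × Int × Int × Int
  inAln : Bool
  rs : List Char
  qs : List Char

def pvStepA (st : PvStA) (line : String) : PvStA :=
  let l := PySem.Chars.strip line.toList
  if PySem.Chars.startswith l pvBEGIN then
    { st with inAln := true, hdr := pvHeader l }
  else if PySem.Chars.startswith l pvEND then
    { st with
      inAln := false,
      ret := st.ret ++ [(st.hdr, String.ofList st.rs, String.ofList st.qs)],
      rs := [], qs := [] }
  else if st.inAln then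
    if l = [] then st
    else if PySem.Chars.isIn ['|'] l || PySem.Chars.isIn ['^'] l then st
    else
      let s := pvSeqWord l
      if st.rs.length > st.qs.length then { st with qs := st.qs ++ s }
      else { st with rs := st.rs ++ s }
  else st

def process_aln_txt (a : List String) : List ((Int × Int × Int × Int) × String × String) :=
  (a.foldl pvStepA ⟨[], (0, 0, 0, 0), false, [], []⟩).ret

-- ===== PORT B =====
-- line and '|' not in line and '^' not in line
def pvKeep (l : List Char) : Bool :=
  !l.isEmpty && !PySem.Chars.isIn ['|'] l && !PySem.Chars.isIn ['^'] l

-- pass-1 state: (blocks so far, current header, current body — none when outside an alignment)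
def pvStepB
    (st : List ((Int × Int × Int × Int) × List (List Char)) × (Int × Int × Int × Int) × Option (List (List Char)))
    (line : String) :
    List ((Int × Int × Int × Int) × List (List Char)) × (Int × Int × Int × Int) × Option (List (List Char)) :=
  let l := PySem.Chars.strip line.toList
  if PySem.Chars.startswith l pvBEGIN then
    (st.1, pvHeader l, some (st.2.2.getD []))
  else if PySem.Chars.startswith l pvEND then
    (st.1 ++ [(st.2.1, st.2.2.getD [])], st.2.1, none)
  else
    match st.2.2 with
    | some b => if pvKeep l then (st.1, st.2.1, some (b ++ [l])) else st
    | none => st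

-- pass 2: rebuild the two sequences of one block with the length-balancing rule
def pvSeqs (body : List (List Char)) : List Char × List Char :=
  body.foldl
    (fun p l =>
      let s := pvSeqWord l
      if p.1.length > p.2.length then (p.1, p.2 ++ s) else (p.1 ++ s, p.2))
    ([], [])

def pvEmit (blk : (Int × Int × Int × Int) × List (List Char)) :
    (Int × Int × Int × Int) × String × String :=
  let p := pvSeqs blk.2
  (blk.1, String.ofList p.1, String.ofList p.2)

def process_aln_txt_alt (a : List String) : List ((Int × Int × Int × Int) × String × String) :=
  ((a.foldl pvStepB ([], (0, 0, 0, 0), none)).1).map pvEmit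

-- ===== PRECONDITION & SPEC =====
def pvBeginOk (l : List Char) : Bool :=
  let fs := PySem.Chars.split₀ l
  decide (12 < fs.length) && (PySem.Int.ofChars? (fs.getD 5 [])).isSome &&
    (PySem.Int.ofChars? (fs.getD 7 [])).isSome && (PySem.Int.ofChars? (fs.getD 10 [])).isSome &&
    (PySem.Int.ofChars? (fs.getD 12 [])).isSome

-- Pre_ excludes inputs where the Python A raises (a '-- BEGIN alignment' line without 13
-- int-parsable fields: IndexError/ValueError) and inputs with an END line before any BEGIN line,
-- where A returns a tuple of None — not a value of the declared Int tuple type.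
def Pre_process_aln_txt (a : List String) : Prop :=
  (∀ s ∈ a, PySem.Chars.startswith (PySem.Chars.strip s.toList) pvBEGIN = true →
      pvBeginOk (PySem.Chars.strip s.toList) = true) ∧
  (∀ i ∈ List.range a.length,
      PySem.Chars.startswith (PySem.Chars.strip ((a.getD i "").toList)) pvEND = true →
      ∃ j ∈ List.range i,
        PySem.Chars.startswith (PySem.Chars.strip ((a.getD j "").toList)) pvBEGIN = true)
instance (a : List String) : Decidable (Pre_process_aln_txt a) := by
  unfold Pre_process_aln_txt; infer_instance

def pvWitness_process_aln_txt : List String :=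
  ["-- BEGIN alignment [ +1 1 - 100 | +1 5 - 105 ]",
   "1 acGT-a", "2 ACctGA", "   ||  ^   ",
   "--   END alignment [ +1 1 - 100 | +1 5 - 105 ]"]

def Spec_process_aln_txt (a : List String) (out : List ((Int × Int × Int × Int) × String × String)) : Prop := out = process_aln_txt_alt a
instance (a : List String) (out : List ((Int × Int × Int × Int) × String × String)) : Decidable (Spec_process_aln_txt a out) := by unfold Spec_process_aln_txt; infer_instance

-- ===== CLAIM (what is proved, stated in full; the proofs are below) =====
def Claim_equal_process_aln_txt : Prop := ∀ (a : List String), Dom_process_aln_txt a → Pre_process_aln_txt a → Spec_process_aln_txt a (process_aln_txt a)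

-- ===== LEMMAS AND PROOFS =====

-- the correspondence between A's loop state and B's pass-1 state
def pvRel (sa : PvStA)
    (sb : List ((Int × Int × Int × Int) × List (List Char)) × (Int × Int × Int × Int) × Option (List (List Char))) : Prop :=
  sa.ret = sb.1.map pvEmit ∧ sa.hdr = sb.2.1 ∧ sa.inAln = sb.2.2.isSome ∧
    (sa.rs, sa.qs) = pvSeqs (sb.2.2.getD [])

theorem pvRel_step (sa : PvStA) (sb : _) (line : String) (h : pvRel sa sb) :
    pvRel (pvStepA sa line) (pvStepB sb line) := by
  obtain ⟨h1, h2, h3, h4⟩ := h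
  unfold pvStepA pvStepB
  by_cases hb : PySem.Chars.startswith (PySem.Chars.strip line.toList) pvBEGIN = true
  · simp only [hb, if_pos]
    exact ⟨h1, rfl, rfl, by simpa using h4⟩
  · by_cases he : PySem.Chars.startswith (PySem.Chars.strip line.toList) pvEND = true
    · simp only [hb, he, if_neg, if_pos, Bool.false_eq_true, not_false_iff]
      refine ⟨?_, h2, rfl, rfl⟩
      simp only [List.map_append, List.map_cons, List.map_nil, h1, h2]
      simp only [pvEmit]
      exact congrArg (fun p => sb.1.map pvEmit ++ [(sb.2.1, p)]) (by rw [← h4])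
    · cases hopt : sb.2.2 with
      | none =>
        have h3' : sa.inAln = false := by simp [h3, hopt]
        simp only [hb, he, if_neg, Bool.false_eq_true, not_false_iff, h3']
        exact ⟨h1, h2, by simp [h3, hopt], by simpa [hopt] using h4⟩
      | some b =>
        have h3' : sa.inAln = true := by simp [h3, hopt]
        simp only [hb, he, if_neg, Bool.false_eq_true, not_false_iff, h3', if_pos]
        by_cases hemp : PySem.Chars.strip line.toList = []
        · have hk0 : pvKeep ([] : List Char) = false := by simp [pvKeep]
          simp only [hemp, if_pos, hk0, Bool.false_eq_true, if_neg, not_false_iff]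
          exact ⟨h1, h2, by simp [h3, hopt], by simpa [hopt] using h4⟩
        · by_cases hpipe : (PySem.Chars.isIn ['|'] (PySem.Chars.strip line.toList)
              || PySem.Chars.isIn ['^'] (PySem.Chars.strip line.toList)) = true
          · have hk0 : pvKeep (PySem.Chars.strip line.toList) = false := by
              rcases Bool.or_eq_true_iff.mp hpipe with h | h <;> simp [pvKeep, h]
            simp only [hemp, hpipe, if_neg, if_pos, hk0, Bool.false_eq_true, not_false_iff]
            exact ⟨h1, h2, by simp [h3, hopt], by simpa [hopt] using h4⟩
          · have hk : pvKeep (PySem.Chars.strip line.toList) = true := by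
              simp only [Bool.or_eq_true_iff, not_or] at hpipe
              simp [pvKeep, hemp, hpipe.1, hpipe.2]
            have h4' : sa.rs = (pvSeqs b).1 ∧ sa.qs = (pvSeqs b).2 := by
              have h := h4; rw [hopt] at h
              exact ⟨congrArg Prod.fst h, congrArg Prod.snd h⟩
            have hseq : pvSeqs (b ++ [PySem.Chars.strip line.toList])
                = if sa.rs.length > sa.qs.length
                  then (sa.rs, sa.qs ++ pvSeqWord (PySem.Chars.strip line.toList))
                  else (sa.rs ++ pvSeqWord (PySem.Chars.strip line.toList), sa.qs) := by
              rw [h4'.1, h4'.2]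
              simp [pvSeqs, List.foldl_append]
            simp only [hemp, hpipe, if_neg, hk, if_pos, Bool.false_eq_true, not_false_iff]
            by_cases hlen : sa.rs.length > sa.qs.length
            · simp only [hlen, if_pos]
              refine ⟨h1, h2, by simp, ?_⟩
              simp only [Option.getD_some, hseq, hlen, if_pos]
            · simp only [hlen, if_neg, not_false_iff]
              refine ⟨h1, h2, by simp, ?_⟩
              simp only [Option.getD_some, hseq, hlen, if_neg, not_false_iff]

theorem pvRel_foldl (a : List String) (sa : PvStA) (sb : _) (h : pvRel sa sb) :
    pvRel (a.foldl pvStepA sa) (a.foldl pvStepB sb) := by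
  induction a generalizing sa sb with
  | nil => exact h
  | cons x t ih => exact ih _ _ (pvRel_step _ _ x h)

-- ===== VERDICT (by name: the statement is the Claim_ definition above) =====
theorem process_aln_txt_spec : Claim_equal_process_aln_txt := by
  intro a _ _
  show _ = _
  have h := pvRel_foldl a ⟨[], (0, 0, 0, 0), false, [], []⟩ ([], (0, 0, 0, 0), none)
    ⟨rfl, rfl, rfl, rfl⟩
  exact h.1
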